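-- pv_equiv track=rewrite | github.com/Z-MALT001/cp1404practicals | prac_05/wimbledon.py | grab_winners_data
-- ===== SOURCE A (Python) =====
-- def grab_winners_data(winners_data):
--     name_to_win = {}
--     winning_countries = set()
--     for row in winners_data:
--         try:
--             name_to_win[row[2]] += 1
--         except KeyError:
--             name_to_win[row[2]] = 1
--             winning_countries.add(row[1])
--     return name_to_win, winning_countries
-- ===== SOURCE B (Python) =====
-- def grab_winners_data(winners_data):
--     name_to_win = {}
--     for name in (row[2] for row in winners_data):
--         name_to_win[name] = name_to_win.get(name, 0) + 1
--     name_to_country = {}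
--     for row in winners_data:
--         if row[2] not in name_to_country:
--             name_to_country[row[2]] = row[1]
--     return name_to_win, set(name_to_country.values())
-- ===== Notes on version B (the rewrite author's own statement) =====
-- stated objective: idiomatic
-- what changed: Replaces A's single interleaved try/except loop with two separately shaped passes: a get-based counting pass over the names, and a first-seen name->country map whose values form the country set.
import Mathlib
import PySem

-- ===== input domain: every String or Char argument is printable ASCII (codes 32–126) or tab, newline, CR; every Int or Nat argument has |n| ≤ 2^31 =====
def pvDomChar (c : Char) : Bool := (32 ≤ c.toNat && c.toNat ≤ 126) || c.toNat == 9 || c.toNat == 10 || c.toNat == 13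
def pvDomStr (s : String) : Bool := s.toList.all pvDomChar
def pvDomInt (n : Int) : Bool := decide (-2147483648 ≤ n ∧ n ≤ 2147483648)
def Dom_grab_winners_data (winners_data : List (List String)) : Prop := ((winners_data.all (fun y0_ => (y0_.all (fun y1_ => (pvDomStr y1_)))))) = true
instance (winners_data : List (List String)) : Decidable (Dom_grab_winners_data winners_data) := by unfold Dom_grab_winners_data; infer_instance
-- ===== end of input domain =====

-- B replaces A's single interleaved try/except loop by two idiomatic passes
-- (get-based counting, then a first-seen name→country map whose values form the set).

-- ===== PORT A =====
-- single loop: try increment; on KeyError set count to 1 and add the country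
def grab_winners_data (winners_data : List (List String)) : (List (String × Int)) × List String :=
  let st := winners_data.foldl
    (fun (st : PySem.Dict String Int × PySem.Set String) row =>
      let name := (PySem.List.pyGet? row 2).getD ""   -- Pre_ guarantees the index is in range
      match st.1.get? name with
      | some v => (st.1.insert name (v + 1), st.2)
      | none   => (st.1.insert name 1,
                   PySem.Set.add st.2 ((PySem.List.pyGet? row 1).getD "")))
    (PySem.Dict.empty, PySem.Set.empty)
  (st.1.items, st.2)

-- ===== PORT B =====
-- pass 1: count names with get(…,0)+1; pass 2: first-seen country map; set of its values
def grab_winners_data_alt (winners_data : List (List String)) : (List (String × Int)) × List String :=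
  let names := winners_data.map (fun row => (PySem.List.pyGet? row 2).getD "")
  let name_to_win := names.foldl
    (fun (d : PySem.Dict String Int) n => d.insert n (d.getD n 0 + 1)) PySem.Dict.empty
  let name_to_country := winners_data.foldl
    (fun (d : PySem.Dict String String) row =>
      let name := (PySem.List.pyGet? row 2).getD ""
      if d.contains name then d
      else d.insert name ((PySem.List.pyGet? row 1).getD "")) PySem.Dict.empty
  (name_to_win.items, PySem.Set.ofList name_to_country.values)

-- ===== PRECONDITION & SPEC =====
-- Pre_: every row has at least 3 entries; on shorter rows Python A raises IndexError (row[2]/row[1]).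
def Pre_grab_winners_data (winners_data : List (List String)) : Prop :=
  ∀ row ∈ winners_data, 3 ≤ row.length
instance (winners_data : List (List String)) : Decidable (Pre_grab_winners_data winners_data) := by unfold Pre_grab_winners_data; infer_instance

def pvWitness_grab_winners_data : List (List String) :=
  [["2020", "AUS", "Fed"], ["2021", "SUI", "Fed"], ["2022", "SRB", "Djo"]]

def Spec_grab_winners_data (winners_data : List (List String)) (out : (List (String × Int)) × List String) : Prop := out = grab_winners_data_alt winners_data
instance (winners_data : List (List String)) (out : (List (String × Int)) × List String) : Decidable (Spec_grab_winners_data winners_data out) := by unfold Spec_grab_winners_data; infer_instance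

-- ===== CLAIM (what is proved, stated in full; the proofs are below) =====
def Claim_equal_grab_winners_data : Prop := ∀ (winners_data : List (List String)), Dom_grab_winners_data winners_data → Pre_grab_winners_data winners_data → Spec_grab_winners_data winners_data (grab_winners_data winners_data)

-- ===== LEMMAS AND PROOFS =====

-- abbreviations for the two projections used by both loops
def pvName (row : List String) : String := (PySem.List.pyGet? row 2).getD ""
def pvCty (row : List String) : String := (PySem.List.pyGet? row 1).getD ""

-- A's loop, named, for the induction
def pvStepA (st : PySem.Dict String Int × PySem.Set String) (row : List String) :
    PySem.Dict String Int × PySem.Set String :=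
  match st.1.get? (pvName row) with
  | some v => (st.1.insert (pvName row) (v + 1), st.2)
  | none   => (st.1.insert (pvName row) 1, PySem.Set.add st.2 (pvCty row))

def pvStepC (d : PySem.Dict String String) (row : List String) : PySem.Dict String String :=
  if d.contains (pvName row) then d else d.insert (pvName row) (pvCty row)

-- A's dict update is insert (getD + 1) regardless of the branch
lemma pvStepA_fst (st : PySem.Dict String Int × PySem.Set String) (row : List String) :
    (pvStepA st row).1 = st.1.insert (pvName row) (st.1.getD (pvName row) 0 + 1) := by
  unfold pvStepA
  cases h : st.1.get? (pvName row) with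
  | some v => simp [PySem.Dict.getD_of_get?_eq_some st.1 0 h]
  | none   => simp [PySem.Dict.getD_of_get?_eq_none st.1 0 h]

lemma pvSet_ofList_append (xs : List String) (c : String) :
    PySem.Set.ofList (xs ++ [c]) = PySem.Set.add (PySem.Set.ofList xs) c := by
  simp [PySem.Set.ofList_eq_foldl, List.foldl_append]

-- main invariant lemma: A's fold from related states equals B's two folds
lemma pvMain (ws : List (List String)) (d : PySem.Dict String Int)
    (m : PySem.Dict String String) (s : PySem.Set String)
    (hk : ∀ n, d.contains n = m.contains n)
    (hs : s = PySem.Set.ofList m.values) :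
    ws.foldl pvStepA (d, s) =
      (ws.foldl (fun (d : PySem.Dict String Int) row =>
          d.insert (pvName row) (d.getD (pvName row) 0 + 1)) d,
       PySem.Set.ofList (ws.foldl pvStepC m).values) := by
  induction ws generalizing d m s with
  | nil => simp [hs]
  | cons r t ih =>
    simp only [List.foldl_cons]
    have hfst := pvStepA_fst (d, s) r
    by_cases hc : d.contains (pvName r) = true
    · have hgs : ∃ v, d.get? (pvName r) = some v := by
        rcases h : d.get? (pvName r) with _ | v
        · rw [PySem.Dict.contains_eq_isSome_get?, h] at hc; simp at hc
        · exact ⟨v, rfl⟩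
      rcases hgs with ⟨v, hv⟩
      have hstep : pvStepA (d, s) r =
          (d.insert (pvName r) (d.getD (pvName r) 0 + 1), s) := by
        unfold pvStepA; simp [PySem.Dict.getD_of_get?_eq_some d 0 hv, hv]
      have hcm : m.contains (pvName r) = true := (hk _).symm.trans hc
      have hC : pvStepC m r = m := by unfold pvStepC; simp [hcm]
      rw [hstep, hC]
      exact ih _ m s (fun n => by
        rw [PySem.Dict.contains_insert]
        cases hnr : (n == pvName r) with
        | true => simp [(beq_iff_eq.mp hnr) ▸ hcm, hk n]
        | false => simp [hk n]) hs
    · have hg : d.get? (pvName r) = none := by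
        rcases h : d.get? (pvName r) with _ | v
        · rfl
        · exfalso; apply hc; rw [PySem.Dict.contains_eq_isSome_get?, h]; rfl
      have hstep : pvStepA (d, s) r =
          (d.insert (pvName r) 1, PySem.Set.add s (pvCty r)) := by
        unfold pvStepA; simp [hg]
      have hcm : m.contains (pvName r) = false := by rw [← hk]; simpa using hc
      have hC : pvStepC m r = m.insert (pvName r) (pvCty r) := by
        unfold pvStepC; simp [hcm]
      have hone : d.insert (pvName r) 1 =
          d.insert (pvName r) (d.getD (pvName r) 0 + 1) := by
        rw [PySem.Dict.getD_of_not_contains d 0 (by simpa using hc)]; norm_num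
      rw [hstep, hC, hone]
      refine ih _ (m.insert (pvName r) (pvCty r)) _ (fun n => by
        rw [PySem.Dict.contains_insert, PySem.Dict.contains_insert, hk n]) ?_
      -- set side: values of the insert append the new country
      have hv : (m.insert (pvName r) (pvCty r)).values = m.values ++ [pvCty r] := by
        simp [PySem.Dict.values, PySem.Dict.items_insert_of_not_contains m (pvCty r) hcm]
      rw [hv, pvSet_ofList_append, hs]

-- ===== VERDICT (by name: the statement is the Claim_ definition above) =====
theorem grab_winners_data_spec : Claim_equal_grab_winners_data := by
  intro ws _ _
  unfold Spec_grab_winners_data grab_winners_data grab_winners_data_alt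
  have h := pvMain ws PySem.Dict.empty PySem.Dict.empty PySem.Set.empty
    (fun n => by simp) (by rfl)
  show ((ws.foldl pvStepA (PySem.Dict.empty, PySem.Set.empty)).1.items,
        (ws.foldl pvStepA (PySem.Dict.empty, PySem.Set.empty)).2) = _
  rw [h]
  refine congrArg₂ Prod.mk ?_ ?_
  · rw [List.foldl_map]; rfl
  · rfl
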